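-- pv_equiv track=rewrite | github.com/dbuchacher/is | speak/app/render.py | _underline_morpheme
-- ===== SOURCE A (Python) =====
-- def _underline_morpheme(morphemes, stress_form):
--     """Build ' · '-joined morpheme line + a caret line underneath the stress."""
--     parts = [m["form"] for m in morphemes]
--     sep = " · "
--     joined = sep.join(parts)
--     # Find where stress starts in joined string.
--     carets = [" "] * len(joined)
--     pos = 0
--     for i, form in enumerate(parts):
--         if form == stress_form:
--             for k in range(len(form)):
--                 if pos + k < len(carets):
--                     carets[pos + k] = "^"
--             break
--         pos += len(form) + len(sep)
--     # keep trailing spaces for position tracking, strip only in caller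
--     return joined, "".join(carets)
-- ===== SOURCE B (Python) =====
-- def _underline_morpheme(morphemes, stress_form):
--     """Build ' · '-joined morpheme line + a caret line underneath the stress."""
--     parts = [m["form"] for m in morphemes]
--     sep = " · "
--     joined = sep.join(parts)
--     try:
--         idx = parts.index(stress_form)
--     except ValueError:
--         return joined, " " * len(joined)
--     pos = len(sep.join(parts[:idx + 1])) - len(stress_form)
--     n = len(stress_form)
--     return joined, " " * pos + "^" * n + " " * (len(joined) - pos - n)
-- ===== Notes on version B (the rewrite author's own statement) =====
-- stated objective: simpler
-- what changed: Replaces A's running-position accumulator and in-place caret-array mutation loop with a direct first-index lookup and an arithmetic prefix-length computation, building the caret line by string repetition and concatenation.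
import Mathlib
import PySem

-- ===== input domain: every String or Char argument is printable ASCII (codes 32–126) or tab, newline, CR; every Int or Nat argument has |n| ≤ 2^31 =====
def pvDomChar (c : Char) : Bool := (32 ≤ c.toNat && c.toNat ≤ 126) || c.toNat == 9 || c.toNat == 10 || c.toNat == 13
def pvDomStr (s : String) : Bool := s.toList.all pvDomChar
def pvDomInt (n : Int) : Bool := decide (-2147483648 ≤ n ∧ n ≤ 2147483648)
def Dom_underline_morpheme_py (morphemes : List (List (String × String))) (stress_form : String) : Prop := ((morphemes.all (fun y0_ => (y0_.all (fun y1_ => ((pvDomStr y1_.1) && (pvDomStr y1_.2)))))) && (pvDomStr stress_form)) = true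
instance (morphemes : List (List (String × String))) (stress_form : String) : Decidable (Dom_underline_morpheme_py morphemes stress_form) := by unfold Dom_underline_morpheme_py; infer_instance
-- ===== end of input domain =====

-- B replaces A's running-position accumulator and caret-array mutation loop with a first-index
-- lookup, a direct prefix-length computation and string repetition/concatenation (objective: simpler).

-- ===== PORT A =====
def pvSep : List Char := [' ', '·', ' ']

-- inner loop: for k in range(len(form)): if pos + k < len(carets): carets[pos+k] = "^"
def pvAInner (formLen pos : Nat) (carets : List Char) : List Char :=
  (List.range formLen).foldl (fun cs k => if pos + k < cs.length then cs.set (pos + k) '^' else cs) carets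

-- outer loop with the running position and the break on first match
def pvALoop (parts : List (List Char)) (stress : List Char) (carets : List Char) (pos : Nat) : List Char :=
  match parts with
  | [] => carets
  | form :: rest =>
    if form = stress then pvAInner form.length pos carets
    else pvALoop rest stress carets (pos + form.length + pvSep.length)

def underline_morpheme_py (morphemes : List (List (String × String))) (stress_form : String) : String × String :=
  let parts := morphemes.map (fun m => (((PySem.Dict.mk m).get? "form").getD "").toList)
  let joined := PySem.Chars.join pvSep parts
  let carets := pvALoop parts stress_form.toList (List.replicate joined.length ' ') 0
  (String.ofList joined, String.ofList carets)

-- ===== PORT B =====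
def underline_morpheme_py_alt (morphemes : List (List (String × String))) (stress_form : String) : String × String :=
  let parts := morphemes.map (fun m => (((PySem.Dict.mk m).get? "form").getD "").toList)
  let joined := PySem.Chars.join pvSep parts
  match PySem.List.index? parts stress_form.toList with
  | none => (String.ofList joined, String.ofList (List.replicate joined.length ' '))
  | some idx =>
    let n := stress_form.toList.length
    let pos := (PySem.Chars.join pvSep (parts.take (idx + 1))).length - n
    (String.ofList joined,
     String.ofList (List.replicate pos ' ' ++ List.replicate n '^' ++ List.replicate (joined.length - pos - n) ' '))

-- ===== PRECONDITION & SPEC =====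
-- Pre_ excludes exactly the inputs where some morpheme dict has no "form" key: Python A (and B) raise KeyError there.
def Pre_underline_morpheme_py (morphemes : List (List (String × String))) (stress_form : String) : Prop :=
  ∀ m ∈ morphemes, (PySem.Dict.mk m).contains "form" = true
instance (morphemes : List (List (String × String))) (stress_form : String) : Decidable (Pre_underline_morpheme_py morphemes stress_form) := by unfold Pre_underline_morpheme_py; infer_instance

def pvWitness_underline_morpheme_py : (List (List (String × String))) × String :=
  ([[("form", "ka")], [("form", "ta")]], "ta")

def Spec_underline_morpheme_py (morphemes : List (List (String × String))) (stress_form : String) (out : String × String) : Prop := out = underline_morpheme_py_alt morphemes stress_form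
instance (morphemes : List (List (String × String))) (stress_form : String) (out : String × String) : Decidable (Spec_underline_morpheme_py morphemes stress_form out) := by unfold Spec_underline_morpheme_py; infer_instance

-- ===== CLAIM (what is proved, stated in full; the proofs are below) =====
def Claim_equal_underline_morpheme_py : Prop := ∀ (morphemes : List (List (String × String))) (stress_form : String), Dom_underline_morpheme_py morphemes stress_form → Pre_underline_morpheme_py morphemes stress_form → Spec_underline_morpheme_py morphemes stress_form (underline_morpheme_py morphemes stress_form)

-- ===== LEMMAS AND PROOFS =====

-- every element's length is bounded by the length of the join
lemma len_le_len_join (x : List Char) : ∀ (l : List (List Char)), x ∈ l →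
    x.length ≤ (PySem.Chars.join pvSep l).length
  | [], h => by simp at h
  | [a], h => by
      simp at h; subst h; simp [PySem.Chars.join_singleton]
  | a :: b :: t, h => by
      rw [PySem.Chars.join_cons_cons]
      rcases List.mem_cons.mp h with rfl | h2
      · simp
      · have := len_le_len_join x (b :: t) h2
        simp only [List.length_append]; omega

-- the inner caret loop on an all-space buffer yields the three-block string
lemma inner_eq (L pos N : Nat) (h : pos + L ≤ N) :
    pvAInner L pos (List.replicate N ' ') =
      List.replicate pos ' ' ++ List.replicate L '^' ++ List.replicate (N - pos - L) ' ' := by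
  induction L with
  | zero =>
      simp only [pvAInner, List.range_zero, List.foldl_nil, List.replicate_zero,
        List.append_nil, Nat.sub_zero]
      rw [show N = pos + (N - pos) from by omega, List.replicate_add]
      simp
  | succ L ih =>
      have hL : pos + L ≤ N := by omega
      simp only [pvAInner] at ih ⊢
      rw [List.range_succ, List.foldl_append, ih hL]
      simp only [List.foldl_cons, List.foldl_nil, List.length_append, List.length_replicate]
      rw [if_pos (by omega)]
      rw [List.set_append, if_neg (by simp)]
      simp only [List.length_append, List.length_replicate, show pos + L - (pos + L) = 0 from by omega,
        show N - pos - L = (N - pos - (L + 1)) + 1 from by omega, List.replicate_succ,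
        List.set_cons_zero]
      simp only [List.append_assoc]
      congr 1
      rw [← List.singleton_append, ← List.append_assoc, ← List.replicate_succ',
        List.replicate_succ, List.cons_append]

-- if s first occurs at index j, the join of the first j+1 elements is at least as long as s
lemma take_index? (s : List Char) (l : List (List Char)) (j : Nat)
    (h : PySem.List.index? l s = some j) :
    s.length ≤ (PySem.Chars.join pvSep (l.take (j + 1))).length := by
  obtain ⟨pre, suf, rfl, hlen, -⟩ := (PySem.List.index?_eq_some_iff ..).mp h
  have ht : (pre ++ s :: suf).take (j + 1) = pre ++ [s] := by
    subst hlen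
    rw [List.take_append]
    simp
  rw [ht]
  exact len_le_len_join s _ (by simp)

-- A's outer loop characterised by the first index of the stress form
lemma loop_eq (s : List Char) : ∀ (parts : List (List Char)) (pos N : Nat),
    pos + (PySem.Chars.join pvSep parts).length ≤ N →
    pvALoop parts s (List.replicate N ' ') pos =
      match PySem.List.index? parts s with
      | none => List.replicate N ' '
      | some j =>
        List.replicate (pos + ((PySem.Chars.join pvSep (parts.take (j + 1))).length - s.length)) ' ' ++
        List.replicate s.length '^' ++
        List.replicate (N - (pos + ((PySem.Chars.join pvSep (parts.take (j + 1))).length - s.length)) - s.length) ' '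
  | [], pos, N, h => by
      rw [PySem.List.index?_eq_idxOf?]
      simp [pvALoop]
  | form :: rest, pos, N, h => by
      by_cases hf : form = s
      · subst hf
        rw [PySem.List.index?_cons_self]
        have hle : form.length ≤ (PySem.Chars.join pvSep (form :: rest)).length :=
          len_le_len_join form _ (by simp)
        simp only [pvALoop, List.take_succ_cons, List.take_zero,
          PySem.Chars.join_singleton, Nat.sub_self, Nat.add_zero]
        exact inner_eq form.length pos N (by omega)
      · rw [PySem.List.index?_cons_of_ne _ hf]
        simp only [pvALoop, if_neg hf]
        match rest with
        | [] =>
            rw [PySem.List.index?_eq_idxOf?]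
            simp [pvALoop]
        | r :: rs =>
            have hjoin : PySem.Chars.join pvSep (form :: r :: rs) =
                form ++ pvSep ++ PySem.Chars.join pvSep (r :: rs) := PySem.Chars.join_cons_cons ..
            have h' : (pos + form.length + pvSep.length) +
                (PySem.Chars.join pvSep (r :: rs)).length ≤ N := by
              rw [hjoin] at h; simp only [List.length_append] at h; omega
            rw [loop_eq s (r :: rs) (pos + form.length + pvSep.length) N h']
            cases hj : PySem.List.index? (r :: rs) s with
            | none => simp
            | some j =>
                have hsl := take_index? s (r :: rs) j hj
                have hpos : (pos + form.length + pvSep.length) +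
                    ((PySem.Chars.join pvSep ((r :: rs).take (j + 1))).length - s.length) =
                    pos + ((PySem.Chars.join pvSep ((form :: r :: rs).take (j + 1 + 1))).length - s.length) := by
                  simp only [List.take_succ_cons] at hsl ⊢
                  rw [PySem.Chars.join_cons_cons]
                  simp only [List.length_append]
                  have : pvSep.length = 3 := rfl
                  omega
                simp only [Option.map_some]
                rw [hpos]

-- ===== VERDICT (by name: the statement is the Claim_ definition above) =====
theorem underline_morpheme_py_spec : Claim_equal_underline_morpheme_py := by
  intro morphemes stress_form _ _
  unfold Spec_underline_morpheme_py underline_morpheme_py underline_morpheme_py_alt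
  set parts := morphemes.map (fun m => (((PySem.Dict.mk m).get? "form").getD "").toList) with hp
  set s := stress_form.toList
  have h := loop_eq s parts 0 (PySem.Chars.join pvSep parts).length (by omega)
  cases hidx : PySem.List.index? parts s with
  | none => simp only [h, hidx]
  | some j => simp only [h, hidx]; simp
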